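-- pv_equiv track=rewrite | github.com/mahmudhera/fancy-mutation-model | src/mutation_model_simulator.py | generate_kmers
-- ===== SOURCE A (Python) =====
-- def generate_kmers(str, k):
--     kmer_set = set()
--     num_spur = 0
--     for i in range(len(str)-k+1):
--         if str[i:i+k] in kmer_set:
--             num_spur += 1
--         kmer_set.add( str[i:i+k] )
--     return kmer_set, num_spur
-- ===== SOURCE B (Python) =====
-- def generate_kmers(str, k):
--     windows = [str[i:i+k] for i in range(len(str) - k + 1)]
--     ws = sorted(windows)
--     num_spur = sum(1 for x, y in zip(ws, ws[1:]) if x == y)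
--     return set(windows), num_spur
-- ===== Notes on version B (the rewrite author's own statement) =====
-- stated objective: alternative
-- what changed: B materialises all k-length windows, SORTS them, and counts duplicates as adjacent equal pairs in the sorted list (a sort-then-scan algorithm), instead of A's single pass with a running set and an inline membership test.
import Mathlib
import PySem

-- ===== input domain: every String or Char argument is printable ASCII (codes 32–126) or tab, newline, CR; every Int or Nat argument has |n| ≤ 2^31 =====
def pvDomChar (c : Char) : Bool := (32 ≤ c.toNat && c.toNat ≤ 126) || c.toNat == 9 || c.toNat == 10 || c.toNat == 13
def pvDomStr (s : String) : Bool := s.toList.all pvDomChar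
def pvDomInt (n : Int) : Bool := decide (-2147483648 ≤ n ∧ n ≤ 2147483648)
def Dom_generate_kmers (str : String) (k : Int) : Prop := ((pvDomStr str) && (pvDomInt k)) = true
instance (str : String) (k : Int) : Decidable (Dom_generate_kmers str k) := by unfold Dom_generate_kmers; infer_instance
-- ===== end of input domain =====

-- B replaces A's running set + inline membership test by a sort-then-scan algorithm:
-- sort all k-length windows and count duplicates as adjacent equal pairs of the sorted list.


-- ===== PORT A =====
-- literal port of A: a loop over range(len(str)-k+1) keeping (kmer_set, num_spur);
-- 'if str[i:i+k] in kmer_set: num_spur += 1' then 'kmer_set.add(str[i:i+k])'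
def generate_kmers (str : String) (k : Int) : List String × Int :=
  (PySem.List.pyRange 0 ((PySem.Str.len str : Int) - k + 1) 1).foldl
    (fun (st : PySem.Set String × Int) i =>
      (PySem.Set.add st.1 (PySem.Str.slice str (some i) (some (i + k))),
       if PySem.Set.contains st.1 (PySem.Str.slice str (some i) (some (i + k))) then st.2 + 1 else st.2))
    (PySem.Set.empty, 0)

-- ===== PORT B =====
-- literal port of B: build the window list, sort it, count adjacent equal pairs of the
-- sorted list via zip(ws, ws[1:]), and return (set(windows), that count).
-- Python's library call sorted(windows) is ported as the library sort List.mergeSort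
-- (stable merge sort; identical output order on strings).
def generate_kmers_alt (str : String) (k : Int) : List String × Int :=
  let windows := (PySem.List.pyRange 0 ((PySem.Str.len str : Int) - k + 1) 1).map
      (fun i => PySem.Str.slice str (some i) (some (i + k)))
  let ws := windows.mergeSort (· ≤ ·)
  let num_spur : Int := (ws.zip (PySem.List.slice ws (some 1) none)).foldl
      (fun acc p => if p.1 == p.2 then acc + 1 else acc) 0
  (PySem.Set.ofList windows, num_spur)

-- ===== PRECONDITION & SPEC =====
def Spec_generate_kmers (str : String) (k : Int) (out : List String × Int) : Prop := out = generate_kmers_alt str k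
instance (str : String) (k : Int) (out : List String × Int) : Decidable (Spec_generate_kmers str k out) := by unfold Spec_generate_kmers; infer_instance

-- ===== CLAIM (what is proved, stated in full; the proofs are below) =====
def Claim_equal_generate_kmers : Prop := ∀ (str : String) (k : Int), Dom_generate_kmers str k → Spec_generate_kmers str k (generate_kmers str k)

-- ===== LEMMAS AND PROOFS =====

-- A's loop over any list of items computes (set of items, #items - #distinct items)
theorem pvA_foldl_char (xs : List String) :
    xs.foldl
      (fun (st : PySem.Set String × Int) x =>
        (PySem.Set.add st.1 x, if PySem.Set.contains st.1 x then st.2 + 1 else st.2))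
      (PySem.Set.empty, 0)
    = (PySem.Set.ofList xs, (xs.length : Int) - (xs.toFinset.card : Int)) := by
  induction xs using List.reverseRecOn with
  | nil => rfl
  | append_singleton xs x ih =>
      rw [List.foldl_append, ih, List.foldl_cons, List.foldl_nil,
        PySem.Set.ofList_append_singleton]
      by_cases hx : x ∈ PySem.Set.ofList xs
      · have hx' : x ∈ xs := by
          have := hx; rwa [PySem.Set.mem_ofList] at this
        rw [if_pos ((PySem.Set.contains_iff _ _).2 hx)]
        refine Prod.ext rfl ?_
        rw [PySem.Set.add_of_mem hx]
        have : (xs ++ [x]).toFinset = xs.toFinset := by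
          ext a; simp; intro h; subst h; exact hx'
        rw [this]
        simp only [List.length_append, List.length_cons, List.length_nil]
        push_cast; ring
      · have hx' : x ∉ xs := by
          intro h; apply hx; rw [PySem.Set.mem_ofList]; exact h
        rw [if_neg (fun h => hx ((PySem.Set.contains_iff _ _).1 h))]
        refine Prod.ext rfl ?_
        rw [PySem.Set.add_of_not_mem hx]
        have : (xs ++ [x]).toFinset = insert x xs.toFinset := by
          ext a; simp
        rw [this, Finset.card_insert_of_notMem (by simpa using hx')]
        simp only [List.length_append, List.length_cons, List.length_nil]
        push_cast; ring

-- in a (≤)-sorted list, #adjacent equal pairs = #elements - #distinct elements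
theorem pvAdj_sorted (ys : List String) (hs : ys.Pairwise (· ≤ ·)) :
    (ys.zip ys.tail).countP (fun p => p.1 == p.2) + ys.toFinset.card = ys.length := by
  induction ys with
  | nil => simp
  | cons a t ih =>
      cases t with
      | nil => simp
      | cons b t' =>
          have hpair := List.pairwise_cons.1 hs
          have hale : ∀ x ∈ b :: t', a ≤ x := hpair.1
          have hst : (b :: t').Pairwise (· ≤ ·) := hpair.2
          have ih' := ih hst
          have hzip : ((a :: b :: t').zip (a :: b :: t').tail)
              = (a, b) :: ((b :: t').zip (b :: t').tail) := by simp
          rw [hzip, List.countP_cons]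
          by_cases hab : a = b
          · have hmem : a ∈ b :: t' := by simp [hab]
            have : (a :: b :: t').toFinset = (b :: t').toFinset := by
              ext x; simp; intro h; subst h; simpa using hmem
            rw [this]
            simp only [hab, beq_self_eq_true, if_pos]
            simp only [List.length_cons] at ih' ⊢
            omega
          · have hnot : a ∉ b :: t' := by
              intro hmem
              rcases List.mem_cons.1 hmem with h | h
              · exact hab h
              · have hba : b ≤ a := (List.pairwise_cons.1 hst).1 a h
                exact hab (le_antisymm (hale b (by simp)) hba)
            have : (a :: b :: t').toFinset = insert a (b :: t').toFinset := by
              ext x; simp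
            rw [this, Finset.card_insert_of_notMem (by simpa using hnot)]
            have hbeq : (a == b) = false := by simp [hab]
            simp only [hbeq, if_neg, Bool.false_eq_true, not_false_eq_true]
            simp only [List.length_cons] at ih' ⊢
            omega

-- ===== VERDICT (by name: the statement is the Claim_ definition above) =====
theorem generate_kmers_spec : Claim_equal_generate_kmers := by
  intro str k _
  show generate_kmers str k = generate_kmers_alt str k
  set l := PySem.List.pyRange 0 ((PySem.Str.len str : Int) - k + 1) 1 with hl
  set f : Int → String := fun i => PySem.Str.slice str (some i) (some (i + k)) with hf
  set windows := l.map f with hw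
  set ws := windows.mergeSort (· ≤ ·) with hws
  have hperm : ws.Perm windows := List.mergeSort_perm windows _
  have hlen : ws.length = windows.length := hperm.length_eq
  have hfin : ws.toFinset = windows.toFinset := by
    ext a; simp [hperm.mem_iff]
  have hsorted : ws.Pairwise (· ≤ ·) := by
    have h := List.pairwise_mergeSort (le := fun a b : String => decide (a ≤ b))
      (fun a b c hab hbc => decide_eq_true (le_trans (of_decide_eq_true hab) (of_decide_eq_true hbc)))
      (fun a b => by simp [le_total]) windows
    exact h.imp (fun hab => of_decide_eq_true hab)
  have hadj := pvAdj_sorted ws hsorted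
  have hLHS : generate_kmers str k
      = (PySem.Set.ofList windows, (windows.length : Int) - (windows.toFinset.card : Int)) := by
    show l.foldl
      (fun (st : PySem.Set String × Int) i =>
        (PySem.Set.add st.1 (f i), if PySem.Set.contains st.1 (f i) then st.2 + 1 else st.2))
      (PySem.Set.empty, 0) = _
    have hstep := List.foldl_map (f := f)
      (g := fun (st : PySem.Set String × Int) x =>
        (PySem.Set.add st.1 x, if PySem.Set.contains st.1 x then st.2 + 1 else st.2))
      (l := l) (init := ((PySem.Set.empty : PySem.Set String), (0 : Int)))
    rw [hw, ← hstep, pvA_foldl_char]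
  have hRHS : generate_kmers_alt str k
      = (PySem.Set.ofList windows,
         (0 : Int) + (((ws.zip ws.tail).countP (fun p => p.1 == p.2) : Nat) : Int)) := by
    show (PySem.Set.ofList windows,
      ((ws.zip (PySem.List.slice ws (some 1) none)).foldl
        (fun acc p => if p.1 == p.2 then acc + 1 else acc) (0 : Int))) = _
    rw [PySem.List.slice_from_one, PySem.List.foldl_if_add_one]
  rw [hLHS, hRHS]
  refine Prod.ext rfl ?_
  rw [hfin, hlen] at hadj
  simp only
  omega
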